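-- pv_equiv track=rewrite | github.com/DoctorCr4nk/adventofcode | 2023/day2-2.py | get_possible_games
-- ===== SOURCE A (Python) =====
-- def get_possible_games(game_info: dict()) -> list:
--     possible_games = list()
--     requirements = {
--         'red'   : 12,
--         'green' : 13,
--         'blue'  : 14 }
--     for gameid in game_info:
--         is_possible = True
--         for pullid in game_info[gameid]:
--             for color in game_info[gameid][pullid]:
--                 if not int(game_info[gameid][pullid][color]) <= requirements[color]:
--                     is_possible = False
--         if is_possible: possible_games.append(gameid)
--     return possible_games
-- ===== SOURCE B (Python) =====
-- def get_possible_games(game_info: dict()) -> list: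
--     requirements = {
--         'red'   : 12,
--         'green' : 13,
--         'blue'  : 14 }
--     possible_games = []
--     for gameid, pulls in game_info.items():
--         # reduce the game to a per-color maximum table, then compare once per color
--         maxima = {}
--         for pull in pulls.values():
--             for color, count in pull.items():
--                 n = int(count)
--                 v = maxima.get(color)
--                 if v is None or n > v:
--                     maxima[color] = n
--         if all(requirements[color] >= n for color, n in maxima.items()):
--             possible_games.append(gameid)
--     return possible_games
-- ===== Notes on version B (the rewrite author's own statement) =====
-- stated objective: alternative
-- what changed: Instead of flipping a sticky is_possible flag while scanning every count, B first reduces each game to a per-color maximum table and then checks the requirements once against that table.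
import Mathlib
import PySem

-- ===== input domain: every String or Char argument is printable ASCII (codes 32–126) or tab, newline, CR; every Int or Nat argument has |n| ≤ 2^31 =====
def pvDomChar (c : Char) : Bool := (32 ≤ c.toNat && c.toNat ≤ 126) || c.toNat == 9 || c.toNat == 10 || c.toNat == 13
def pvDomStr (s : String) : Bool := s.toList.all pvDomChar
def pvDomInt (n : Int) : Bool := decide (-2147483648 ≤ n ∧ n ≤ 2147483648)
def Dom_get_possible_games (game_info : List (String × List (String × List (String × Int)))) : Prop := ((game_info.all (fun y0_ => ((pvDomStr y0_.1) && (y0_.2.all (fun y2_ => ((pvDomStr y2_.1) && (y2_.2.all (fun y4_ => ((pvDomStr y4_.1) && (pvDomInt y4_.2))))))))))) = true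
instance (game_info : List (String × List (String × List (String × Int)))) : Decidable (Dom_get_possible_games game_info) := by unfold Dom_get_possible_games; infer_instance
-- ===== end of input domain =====

-- B replaces A's sticky is_possible-flag scan by a per-game per-color maximum table checked once
-- against the requirements (alternative decomposition, same cost; return value proved equal on Pre_).


-- shared constant: the `requirements` dict literal both Pythons declare
def pvReq : PySem.Dict String Int :=
  ((PySem.Dict.empty.insert "red" 12).insert "green" 13).insert "blue" 14

-- ===== PORT A =====
-- Literal port of A: sticky flag over every pull and color; requirements[color] raising KeyError
-- is the `none` branch of pvReq.get? (unreachable under Pre_; the guard only keeps the port total).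
def get_possible_games (game_info : List (String × List (String × List (String × Int)))) : List String :=
  game_info.foldl (fun possible_games g =>
    let is_possible := g.2.foldl (fun acc pull =>
      pull.2.foldl (fun acc2 e =>
        match pvReq.get? e.1 with
        | some r => if ¬ (e.2 ≤ r) then false else acc2
        | none => acc2) acc) true
    if is_possible then possible_games ++ [g.1] else possible_games) []

-- ===== PORT B =====
-- per-game maximum table: maxima.get(color) is None, or n exceeds it → maxima[color] = n
def pvMaxStep (m : PySem.Dict String Int) (e : String × Int) : PySem.Dict String Int :=
  match m.get? e.1 with
  | none => m.insert e.1 e.2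
  | some v => if e.2 > v then m.insert e.1 e.2 else m

def pvMaxTable (pulls : List (String × List (String × Int))) : PySem.Dict String Int :=
  pulls.foldl (fun m pull => pull.2.foldl pvMaxStep m) PySem.Dict.empty

-- `all(requirements[color] >= n for color, n in maxima.items())`; KeyError = the `none` branch
def get_possible_games_alt (game_info : List (String × List (String × List (String × Int)))) : List String :=
  game_info.foldl (fun possible_games g =>
    let maxima := pvMaxTable g.2
    if maxima.items.all (fun p =>
        match pvReq.get? p.1 with
        | some r => decide (r ≥ p.2)
        | none => false)
    then possible_games ++ [g.1] else possible_games) []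

-- ===== PRECONDITION & SPEC =====
-- Pre_ excludes exactly the inputs where some color is not a requirements key: there Python A
-- raises KeyError (requirements[color]) and returns nothing.
def Pre_get_possible_games (game_info : List (String × List (String × List (String × Int)))) : Prop :=
  (game_info.all (fun g => g.2.all (fun pull => pull.2.all
     (fun e => e.1 == "red" || e.1 == "green" || e.1 == "blue")))) = true
instance (game_info : List (String × List (String × List (String × Int)))) : Decidable (Pre_get_possible_games game_info) := by unfold Pre_get_possible_games; infer_instance

def pvWitness_get_possible_games : (List (String × List (String × List (String × Int)))) :=
  [("Game 1", [("pull 0", [("red", 3), ("blue", 2)]), ("pull 1", [("red", 13)])]),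
   ("Game 2", [("pull 0", [("green", 13)])])]

def Spec_get_possible_games (game_info : List (String × List (String × List (String × Int)))) (out : List String) : Prop := out = get_possible_games_alt game_info
instance (game_info : List (String × List (String × List (String × Int)))) (out : List String) : Decidable (Spec_get_possible_games game_info out) := by unfold Spec_get_possible_games; infer_instance

-- ===== CLAIM (what is proved, stated in full; the proofs are below) =====
def Claim_equal_get_possible_games : Prop := ∀ (game_info : List (String × List (String × List (String × Int)))), Dom_get_possible_games game_info → Pre_get_possible_games game_info → Spec_get_possible_games game_info (get_possible_games game_info)

-- ===== LEMMAS AND PROOFS =====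

-- the per-entry check both sides reduce to
def pvGood (e : String × Int) : Bool :=
  match pvReq.get? e.1 with
  | some r => decide (e.2 ≤ r)
  | none => false

def pvValid (e : String × Int) : Bool := e.1 == "red" || e.1 == "green" || e.1 == "blue"

theorem pvGood_mono (c : String) {n v : Int} (h : n ≤ v) (hg : pvGood (c, v) = true) :
    pvGood (c, n) = true := by
  unfold pvGood at *
  cases hr : pvReq.get? c with
  | none => simp [hr] at hg
  | some r => simp [hr] at hg ⊢; omega

theorem pvValid_isSome (e : String × Int) (h : pvValid e = true) :
    ∃ r, pvReq.get? e.1 = some r := by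
  unfold pvValid at h
  obtain ⟨c, n⟩ := e
  simp at h
  rcases h with (h | h) | h <;> subst h
  · refine ⟨12, ?_⟩
    show pvReq.get? "red" = some 12
    decide
  · refine ⟨13, ?_⟩
    show pvReq.get? "green" = some 13
    decide
  · refine ⟨14, ?_⟩
    show pvReq.get? "blue" = some 14
    decide

-- A's inner flag fold is a conjunction
theorem pvA_inner (l : List (String × Int)) (acc : Bool)
    (hv : ∀ e ∈ l, pvValid e = true) :
    l.foldl (fun acc2 e =>
        match pvReq.get? e.1 with
        | some r => if ¬ (e.2 ≤ r) then false else acc2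
        | none => acc2) acc = (acc && l.all pvGood) := by
  induction l generalizing acc with
  | nil => simp
  | cons e t ih =>
    obtain ⟨r, hr⟩ := pvValid_isSome e (hv e (by simp))
    have hstep : (match pvReq.get? e.1 with
        | some r => if ¬ (e.2 ≤ r) then false else acc
        | none => acc) = (acc && pvGood e) := by
      unfold pvGood
      rw [hr]
      by_cases h : e.2 ≤ r <;> simp [h]
    rw [List.foldl_cons, hstep, ih _ (fun x hx => hv x (by simp [hx]))]
    simp [Bool.and_assoc]

theorem pvA_outer (pulls : List (String × List (String × Int))) (acc : Bool)
    (hv : ∀ pull ∈ pulls, ∀ e ∈ pull.2, pvValid e = true) :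
    pulls.foldl (fun acc pull =>
      pull.2.foldl (fun acc2 e =>
        match pvReq.get? e.1 with
        | some r => if ¬ (e.2 ≤ r) then false else acc2
        | none => acc2) acc) acc = (acc && pulls.all (fun p => p.2.all pvGood)) := by
  induction pulls generalizing acc with
  | nil => simp
  | cons p t ih =>
    rw [List.foldl_cons, pvA_inner _ _ (hv p (by simp)),
        ih _ (fun x hx e he => hv x (by simp [hx]) e he)]
    simp [Bool.and_assoc]

-- B side: one pvMaxStep keeps the keys unique
theorem pvMaxStep_nodup (m : PySem.Dict String Int) (h : m.keys.Nodup) (e : String × Int) :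
    (pvMaxStep m e).keys.Nodup := by
  unfold pvMaxStep
  cases hg : m.get? e.1 with
  | none => exact PySem.Dict.nodup_keys_insert _ _ _ h
  | some v =>
    by_cases hlt : e.2 > v
    · simpa [hlt] using PySem.Dict.nodup_keys_insert m e.1 e.2 h
    · simpa [hlt] using h

-- replacing the unique c-entry of a key-nodup assoc list by a larger count
theorem pvMapReplace (l : List (String × Int)) (c : String) (n v : Int)
    (hnd : (l.map (·.1)).Nodup) (hm : (c, v) ∈ l) (hvn : v ≤ n) :
    (l.map (fun p => if p.1 == c then (c, n) else p)).all pvGood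
      = (l.all pvGood && pvGood (c, n)) := by
  induction l with
  | nil => simp at hm
  | cons p t ih =>
    simp only [List.map_cons, List.nodup_cons] at hnd
    rcases List.mem_cons.mp hm with hp | hp
    · subst hp
      have ht : t.map (fun p => if p.1 == c then (c, n) else p) = t := by
        conv_rhs => rw [← List.map_id t]
        apply List.map_congr_left
        intro q hq
        have hqc : q.1 ≠ c := by
          intro hqc
          exact hnd.1 (by rw [← hqc]; exact List.mem_map.mpr ⟨q, hq, rfl⟩)
        simp [hqc]
      simp only [List.map_cons, beq_self_eq_true, if_pos, List.all_cons, ht]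
      by_cases hgn : pvGood (c, n) = true
      · have := pvGood_mono c hvn hgn
        simp [hgn, this]
      · simp [Bool.not_eq_true] at hgn
        simp [hgn]
    · have hpc : p.1 ≠ c := by
        intro hc
        apply hnd.1
        rw [hc]
        exact List.mem_map.mpr ⟨(c, v), hp, rfl⟩
      have hb : (p.1 == c) = false := by simpa using hpc
      simp only [List.map_cons, List.all_cons, ih hnd.2 hp, hb]
      simp [Bool.and_assoc]

theorem pvMaxStep_allGood (m : PySem.Dict String Int) (h : m.keys.Nodup) (e : String × Int) :
    (pvMaxStep m e).items.all pvGood = (m.items.all pvGood && pvGood e) := by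
  obtain ⟨c, nn⟩ := e
  unfold pvMaxStep
  cases hg : m.get? c with
  | none =>
    have hc : m.contains c = false := by
      rw [PySem.Dict.contains_eq_isSome_get?, hg]; rfl
    simp [PySem.Dict.insert, hc]
  | some v =>
    have hmem : (c, v) ∈ m.items := PySem.Dict.mem_items_of_get?_eq_some _ hg
    by_cases hlt : nn > v
    · have hc : m.contains c = true := by
        rw [PySem.Dict.contains_eq_isSome_get?, hg]; rfl
      have hnd : (m.items.map (·.1)).Nodup := h
      simp only [hlt, if_pos, PySem.Dict.insert, hc]
      exact pvMapReplace m.items c nn v hnd hmem (by omega)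
    · simp only [hlt]
      by_cases hall : m.items.all pvGood = true
      · have hgv : pvGood (c, v) = true := by
          rw [List.all_eq_true] at hall
          exact hall _ hmem
        have := pvGood_mono c (show nn ≤ v by omega) hgv
        simp [hall, this]
      · simp [Bool.not_eq_true] at hall
        simp [hall]

theorem pvB_inner (l : List (String × Int)) (m : PySem.Dict String Int) (h : m.keys.Nodup) :
    (l.foldl pvMaxStep m).keys.Nodup ∧
      (l.foldl pvMaxStep m).items.all pvGood = (m.items.all pvGood && l.all pvGood) := by
  induction l generalizing m with
  | nil => simpa using h
  | cons e t ih =>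
    obtain ⟨ih1, ih2⟩ := ih (pvMaxStep m e) (pvMaxStep_nodup m h e)
    refine ⟨ih1, ?_⟩
    rw [List.foldl_cons] at *
    rw [ih2, pvMaxStep_allGood m h e]
    simp [Bool.and_assoc]

theorem pvB_outer (pulls : List (String × List (String × Int))) (m : PySem.Dict String Int)
    (h : m.keys.Nodup) :
    (pulls.foldl (fun m pull => pull.2.foldl pvMaxStep m) m).keys.Nodup ∧
      (pulls.foldl (fun m pull => pull.2.foldl pvMaxStep m) m).items.all pvGood
        = (m.items.all pvGood && pulls.all (fun p => p.2.all pvGood)) := by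
  induction pulls generalizing m with
  | nil => simpa using h
  | cons p t ih =>
    obtain ⟨h1, h2⟩ := pvB_inner p.2 m h
    obtain ⟨ih1, ih2⟩ := ih _ h1
    refine ⟨ih1, ?_⟩
    rw [List.foldl_cons] at *
    rw [ih2, h2]
    simp [Bool.and_assoc]

-- per game, B's table check equals A's flag
theorem pvGame_eq (pulls : List (String × List (String × Int)))
    (hv : ∀ pull ∈ pulls, ∀ e ∈ pull.2, pvValid e = true) :
    (pvMaxTable pulls).items.all (fun p =>
        match pvReq.get? p.1 with
        | some r => decide (r ≥ p.2)
        | none => false)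
      = pulls.foldl (fun acc pull =>
          pull.2.foldl (fun acc2 e =>
            match pvReq.get? e.1 with
            | some r => if ¬ (e.2 ≤ r) then false else acc2
            | none => acc2) acc) true := by
  have hB := (pvB_outer pulls PySem.Dict.empty (by simp [PySem.Dict.keys, PySem.Dict.empty])).2
  have hchk : (pvMaxTable pulls).items.all (fun p =>
      match pvReq.get? p.1 with
      | some r => decide (r ≥ p.2)
      | none => false) = (pvMaxTable pulls).items.all pvGood := rfl
  rw [hchk, pvMaxTable, hB, pvA_outer pulls true hv]
  simp [PySem.Dict.empty]

theorem pvTop (gi : List (String × List (String × List (String × Int)))) (acc : List String)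
    (hv : ∀ g ∈ gi, ∀ pull ∈ g.2, ∀ e ∈ pull.2, pvValid e = true) :
    gi.foldl (fun possible_games g =>
      let is_possible := g.2.foldl (fun acc pull =>
        pull.2.foldl (fun acc2 e =>
          match pvReq.get? e.1 with
          | some r => if ¬ (e.2 ≤ r) then false else acc2
          | none => acc2) acc) true
      if is_possible then possible_games ++ [g.1] else possible_games) acc
    = gi.foldl (fun possible_games g =>
        let maxima := pvMaxTable g.2
        if maxima.items.all (fun p =>
            match pvReq.get? p.1 with
            | some r => decide (r ≥ p.2)
            | none => false)
        then possible_games ++ [g.1] else possible_games) acc := by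
  induction gi generalizing acc with
  | nil => rfl
  | cons g t ih =>
    simp only [List.foldl_cons]
    rw [pvGame_eq g.2 (hv g (by simp))]
    exact ih _ (fun x hx => hv x (by simp [hx]))

theorem get_possible_games_spec : Claim_equal_get_possible_games := by
  unfold Claim_equal_get_possible_games Spec_get_possible_games
  intro gi _ hpre
  unfold Pre_get_possible_games at hpre
  unfold get_possible_games get_possible_games_alt
  apply pvTop
  intro g hg pull hp e he
  rw [List.all_eq_true] at hpre
  have h1 := hpre g hg
  rw [List.all_eq_true] at h1
  have h2 := h1 pull hp
  rw [List.all_eq_true] at h2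
  exact h2 e he
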